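-- pv_equiv track=rewrite | github.com/FutureMaker0/Programmers-Lv.0 | 피자 나눠 먹기 (2).py | solution
-- ===== SOURCE A (Python) =====
-- def solution(n):
--     answer = 0
--     pizza = 6
--
--     arr = []
--     for i in range(1, n+1):
--         if (i*pizza) % n == 0:
--             arr.append(i)
--
--     answer = min(arr)
--
--     return answer
-- ===== SOURCE B (Python) =====
-- def solution(n):
--     # gcd(6, n) by Euclid, then one exact division: min i with n | 6i is n // gcd(6, n)
--     a, b = 6, n
--     while b:
--         a, b = b, a % b
--     return n // a
-- ===== Notes on version B (the rewrite author's own statement) =====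
-- stated objective: faster
-- what changed: Replaced the O(n) scan for the least i with 6i divisible by n (followed by min over the collected list) by Euclid's gcd and the closed form n // gcd(6, n).
import Mathlib
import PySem

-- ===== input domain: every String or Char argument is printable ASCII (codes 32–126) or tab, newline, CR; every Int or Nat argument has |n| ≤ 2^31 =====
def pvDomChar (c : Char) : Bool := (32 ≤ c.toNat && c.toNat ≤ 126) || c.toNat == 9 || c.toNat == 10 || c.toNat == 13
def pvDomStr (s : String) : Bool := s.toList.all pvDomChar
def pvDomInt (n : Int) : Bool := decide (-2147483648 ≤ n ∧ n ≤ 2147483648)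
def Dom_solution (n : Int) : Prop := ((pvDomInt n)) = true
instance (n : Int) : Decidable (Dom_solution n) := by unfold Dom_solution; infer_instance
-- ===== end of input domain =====

-- B replaces A's linear scan by Euclid's gcd and the closed form n // gcd(6, n).

-- ===== PORT A =====
def solution (n : Int) : Int :=
  let pizza : Int := 6
  let arr : List Int :=
    (PySem.List.pyRange 1 (n + 1) 1).foldl
      (fun acc i => if PySem.Int.mod (i * pizza) n == 0 then acc ++ [i] else acc) []
  -- min(arr) raises ValueError on empty arr; Pre_solution excludes that, getD 0 is the total form
  (PySem.List.min? arr (fun x => x)).getD 0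

-- ===== PORT B =====
-- termination measure for the Euclid loop (cited by the port's decreasing_by)
theorem pvModNatAbsLt (a b : Int) (h : ¬ b = 0) :
    (PySem.Int.mod a b).natAbs < b.natAbs := by
  rcases lt_or_gt_of_ne h with hb | hb
  · have := PySem.Int.mod_neg_bounds a hb
    omega
  · have h1 := PySem.Int.mod_nonneg a hb
    have h2 := PySem.Int.mod_lt a hb
    omega

-- a, b = 6, n; while b: a, b = b, a % b
def pvEuclid (a b : Int) : Int :=
  if h : b = 0 then a else pvEuclid b (PySem.Int.mod a b)
termination_by b.natAbs
decreasing_by exact pvModNatAbsLt a b h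

def solution_alt (n : Int) : Int := PySem.Int.floordiv n (pvEuclid 6 n)

-- ===== PRECONDITION & SPEC =====
-- Pre_ excludes exactly n ≤ 0, where A's arr is empty and min([]) raises ValueError.
def Pre_solution (n : Int) : Prop := 1 ≤ n
instance (n : Int) : Decidable (Pre_solution n) := by unfold Pre_solution; infer_instance
def pvWitness_solution : Int := (7)

def Spec_solution (n : Int) (out : Int) : Prop := out = solution_alt n
instance (n : Int) (out : Int) : Decidable (Spec_solution n out) := by unfold Spec_solution; infer_instance

-- ===== CLAIM (what is proved, stated in full; the proofs are below) =====
def Claim_equal_solution : Prop := ∀ (n : Int), Dom_solution n → Pre_solution n → Spec_solution n (solution n)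

-- ===== LEMMAS AND PROOFS =====

-- the Euclid loop computes Int.gcd on nonnegative inputs (fuel-style strong induction on |b|)
theorem pvEuclid_eq_gcd : ∀ (k : Nat) (a b : Int), b.natAbs ≤ k → 0 ≤ a → 0 ≤ b →
    pvEuclid a b = (Int.gcd a b : Int) := by
  intro k
  induction k with
  | zero =>
    intro a b hk ha _
    have hb0 : b = 0 := by omega
    rw [pvEuclid]
    simp [hb0, Int.natAbs_of_nonneg ha]
  | succ k ih =>
    intro a b hk ha hb
    rw [pvEuclid]
    by_cases hb0 : b = 0
    · simp [hb0, Int.natAbs_of_nonneg ha]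
    · simp only [hb0, dite_false]
      have hbpos : 0 < b := lt_of_le_of_ne hb (Ne.symm hb0)
      have hmod : PySem.Int.mod a b = a % b := PySem.Int.mod_eq_emod_of_pos hbpos
      have h1 : 0 ≤ a % b := Int.emod_nonneg a hb0
      have h2 : a % b < b := Int.emod_lt_of_pos a hbpos
      have hrec := ih b (PySem.Int.mod a b) (by rw [hmod]; omega) hb (by rw [hmod]; exact h1)
      rw [hrec, hmod]
      rw [Int.gcd_comm b (a % b), Int.gcd_emod]

theorem pvFoldlMinEq (d : Int) (t : List Int) (h : ∀ x ∈ t, d ≤ x) :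
    t.foldl min d = d := by
  induction t with
  | nil => rfl
  | cons x t ih =>
    have hx : min d x = d := min_eq_left (h x (by simp))
    simp only [List.foldl_cons, hx]
    exact ih (fun y hy => h y (by simp [hy]))

-- ===== VERDICT (by name: the statement is the Claim_ definition above) =====
theorem solution_spec : Claim_equal_solution := by
  intro n _ hn
  have hn1 : (1 : Int) ≤ n := hn
  unfold Spec_solution solution solution_alt
  dsimp only
  set gZ : Int := (Int.gcd 6 n : Int) with hgZ
  have hgpos : 0 < gZ := by
    have h0 : 0 < Int.gcd 6 n := Int.gcd_pos_of_ne_zero_left n (by norm_num)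
    rw [hgZ]
    exact_mod_cast h0
  have hg6 : gZ ∣ 6 := by rw [hgZ]; exact Int.gcd_dvd_left 6 n
  have hgn : gZ ∣ n := by rw [hgZ]; exact Int.gcd_dvd_right 6 n
  set d : Int := n / gZ with hd
  have hdn : gZ * d = n := Int.mul_ediv_cancel' hgn
  have hd1 : 1 ≤ d := by
    by_contra hc
    have hc' : d ≤ 0 := by omega
    have : gZ * d ≤ 0 := mul_nonpos_of_nonneg_of_nonpos (le_of_lt hgpos) hc'
    omega
  have hdle : d ≤ n := by nlinarith
  set u : Int := 6 / gZ with hu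
  have hu6 : gZ * u = 6 := Int.mul_ediv_cancel' hg6
  have hcop : Int.gcd u d = 1 := by
    rw [hu, hd, hgZ]
    exact Int.gcd_div_gcd_div_gcd (Int.gcd_pos_of_ne_zero_left n (by norm_num))
  have hIsCop : IsCoprime u d := Int.isCoprime_iff_gcd_eq_one.mpr hcop
  have key : ∀ i : Int, (n ∣ i * 6 ↔ d ∣ i) := by
    intro i
    constructor
    · intro hdvd
      have h1 : gZ * d ∣ gZ * (i * u) := by
        rw [hdn]
        have : gZ * (i * u) = i * 6 := by rw [← hu6]; ring
        rw [this]
        exact hdvd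
      have h2 : d ∣ i * u := (mul_dvd_mul_iff_left (by omega : gZ ≠ 0)).mp h1
      exact hIsCop.symm.dvd_of_dvd_mul_right h2
    · intro hdvd
      have h1 : n ∣ d * 6 := ⟨u, by rw [← hdn, ← hu6]; ring⟩
      exact h1.trans (mul_dvd_mul_right hdvd 6)
  -- A's loop builds the filtered range
  rw [PySem.List.foldl_append_if]
  simp only [List.map_id', List.nil_append]
  -- split the range at d and peel d off
  rw [PySem.List.pyRange_one_append 1 d (n + 1) hd1 (by omega),
      PySem.List.pyRange_one_cons (by omega : d < n + 1)]
  rw [List.filter_append]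
  have hfilter1 :
      (PySem.List.pyRange 1 d 1).filter (fun i => PySem.Int.mod (i * 6) n == 0) = [] := by
    apply List.filter_eq_nil_iff.mpr
    intro i hi
    have hmem := (PySem.List.mem_pyRange_one).mp hi
    simp only [beq_iff_eq, PySem.Int.mod_eq_zero_iff_dvd]
    intro hdvd
    have := Int.le_of_dvd (by omega) ((key i).mp hdvd)
    omega
  have hpd : (PySem.Int.mod (d * 6) n == 0) = true := by
    simp only [beq_iff_eq, PySem.Int.mod_eq_zero_iff_dvd]
    exact (key d).mpr dvd_rfl
  rw [hfilter1, List.nil_append, List.filter_cons, hpd]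
  simp only [if_true]
  rw [PySem.List.min?_id_cons]
  simp only [Option.getD_some]
  have hmin :
      (((PySem.List.pyRange (d + 1) (n + 1) 1).filter
        (fun i => PySem.Int.mod (i * 6) n == 0)).foldl min d) = d := by
    apply pvFoldlMinEq
    intro x hx
    have hx' := (PySem.List.mem_pyRange_one).mp (List.mem_of_mem_filter hx)
    omega
  rw [hmin]
  -- B's side: Euclid computes gZ, then floor division is exact division
  have heu : pvEuclid 6 n = gZ :=
    pvEuclid_eq_gcd n.natAbs 6 n le_rfl (by norm_num) (by omega)
  rw [heu, PySem.Int.floordiv_eq_ediv_of_pos hgpos]
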